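-- pv_equiv track=rewrite | github.com/hidir-yesiltep3/Algorithms | Dynamic Programming/006.py | countPairingDP
-- ===== SOURCE A (Python) =====
-- def countPairingDP(n):
--     '''
--     This solution utilizes from 1D Dynamic Programming.
--     In simpler words, we will record solutions of each of the subproblems.
--     Using this subsolutions we are going to build the final solution.
--     '''
--     # Create the dp table
--     dp = [0 for i in range(n + 1)]
--
--     for i in range(n + 1):
--         # For i = 0, 1 and 2 there are 0, 1 and 2 ways respectiveley.
--         if i <= 2:
--             dp[i] = i
--
--         # Otherwise, we use the same formula as above function.
--         else:
--             dp[i] = dp[i - 1] + (i - 1) * dp[i - 2]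
--
--     return dp[n]
-- ===== SOURCE B (Python) =====
-- def countPairingDP(n):
--     # Demand-driven (top-down) evaluation: a worklist resolves dp[n] by
--     # pushing unmet dependencies, instead of sweeping the table bottom-up.
--     dp = [None] * (n + 1)
--     stack = [n]
--     while stack:
--         j = stack[-1]
--         if dp[j] is not None:
--             stack.pop()
--         elif j <= 2:
--             dp[j] = j
--             stack.pop()
--         elif dp[j - 1] is not None and dp[j - 2] is not None:
--             dp[j] = dp[j - 1] + (j - 1) * dp[j - 2]
--             stack.pop()
--         else:
--             stack.append(j - 1)
--             stack.append(j - 2)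
--     return dp[n]
-- ===== Notes on version B (the rewrite author's own statement) =====
-- stated objective: alternative
-- what changed: Replaces A's bottom-up sweep over the whole table with a demand-driven worklist: an explicit stack resolves dp[n] top-down, pushing unmet dependencies and combining once both are memoized.
import Mathlib
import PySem

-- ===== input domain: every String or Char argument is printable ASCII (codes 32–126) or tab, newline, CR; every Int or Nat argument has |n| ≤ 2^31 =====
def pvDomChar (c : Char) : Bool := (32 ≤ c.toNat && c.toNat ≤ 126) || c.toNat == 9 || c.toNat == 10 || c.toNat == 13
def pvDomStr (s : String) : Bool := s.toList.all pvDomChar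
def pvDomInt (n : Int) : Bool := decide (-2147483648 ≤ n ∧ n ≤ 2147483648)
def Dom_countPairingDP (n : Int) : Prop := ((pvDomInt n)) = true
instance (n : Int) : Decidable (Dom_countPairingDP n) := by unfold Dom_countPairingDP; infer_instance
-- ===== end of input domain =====

-- B replaces A's bottom-up table sweep with a demand-driven worklist (explicit-stack top-down memoization); return-value equivalence on n ≥ 0.


-- ===== PORT A =====
-- one loop step of A: the body of 'for i in range(n + 1)'
def pvStepA (dp : List Int) (i : Int) : List Int :=
  if i ≤ 2 then PySem.List.pySetD dp i i
  else PySem.List.pySetD dp i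
    (PySem.List.pyGetD dp (i - 1) 0 + (i - 1) * PySem.List.pyGetD dp (i - 2) 0)

def countPairingDP (n : Int) : Int :=
  let dp := (PySem.List.pyRange 0 (n + 1) 1).map (fun _ => (0 : Int))
  let dp := (PySem.List.pyRange 0 (n + 1) 1).foldl pvStepA dp
  PySem.List.pyGetD dp n 0

-- ===== PORT B =====
-- The 'while stack:' loop of B; the Lean stack's head is Python's stack[-1].
-- The fuel argument only makes the loop total; pvLoopB_fuel below proves 3*(n+1)+2 steps always suffice.
def pvLoopB : Nat → List (Option Int) → List Int → List (Option Int)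
  | 0, dp, _ => dp
  | _ + 1, dp, [] => dp
  | fuel + 1, dp, j :: rest =>
    match PySem.List.pyGetD dp j none with      -- if dp[j] is not None: pop
    | some _ => pvLoopB fuel dp rest
    | none =>
      if j ≤ 2 then                              -- elif j <= 2: dp[j] = j; pop
        pvLoopB fuel (PySem.List.pySetD dp j (some j)) rest
      else
        match PySem.List.pyGetD dp (j - 1) none, PySem.List.pyGetD dp (j - 2) none with
        | some a, some b =>                      -- elif both deps known: combine; pop
          pvLoopB fuel (PySem.List.pySetD dp j (some (a + (j - 1) * b))) rest
        | _, _ =>                                -- else: push j-1 then j-2 (j-2 on top)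
          pvLoopB fuel dp ((j - 2) :: (j - 1) :: j :: rest)

def countPairingDP_alt (n : Int) : Int :=
  let dp := (PySem.List.pyRange 0 (n + 1) 1).map (fun _ => (none : Option Int))  -- dp = [None]*(n+1)
  let dp := pvLoopB (3 * (n + 1) + 2).toNat dp [n]                               -- while stack: …
  (PySem.List.pyGetD dp n none).getD 0                                           -- return dp[n] (filled under Pre_)

-- ===== PRECONDITION & SPEC =====
-- Pre_ excludes exactly the negative arguments, on which the Python A raises IndexError (dp is empty, dp[n] out of range).
def Pre_countPairingDP (n : Int) : Prop := 0 ≤ n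
instance (n : Int) : Decidable (Pre_countPairingDP n) := by unfold Pre_countPairingDP; infer_instance
def pvWitness_countPairingDP : Int := (5)

def Spec_countPairingDP (n : Int) (out : Int) : Prop := out = countPairingDP_alt n
instance (n : Int) (out : Int) : Decidable (Spec_countPairingDP n out) := by unfold Spec_countPairingDP; infer_instance

-- ===== CLAIM (what is proved, stated in full; the proofs are below) =====
def Claim_equal_countPairingDP : Prop := ∀ (n : Int), Dom_countPairingDP n → Pre_countPairingDP n → Spec_countPairingDP n (countPairingDP n)

-- ===== LEMMAS AND PROOFS =====

-- the mathematical sequence both programs compute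
def pvF : Nat → Int
  | 0 => 0
  | 1 => 1
  | 2 => 2
  | (k + 3) => pvF (k + 2) + ((k : Int) + 2) * pvF (k + 1)

lemma pvF_small (m : Nat) (h : m ≤ 2) : pvF m = (m : Int) := by
  interval_cases m <;> rfl

-- A's table after processing range(0, m) holds pvF below m and the initial 0 above
lemma foldA (L : Nat) : ∀ m : Nat, m ≤ L →
    (PySem.List.pyRange 0 (m : Int) 1).foldl pvStepA ((List.range L).map (fun _ => (0 : Int)))
      = (List.range L).map (fun j => if j < m then pvF j else 0) := by
  intro m
  induction m with
  | zero => intro _; simp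
  | succ m ih =>
    intro hm
    have hmL : m < L := hm
    have hsplit : PySem.List.pyRange 0 ((m : Int) + 1) 1
        = PySem.List.pyRange 0 (m : Int) 1 ++ [(m : Int)] := by
      exact PySem.List.pyRange_one_succ_right (by exact_mod_cast Nat.zero_le m)
    rw [Nat.cast_add, Nat.cast_one, hsplit, List.foldl_append, ih (Nat.le_of_lt hmL)]
    simp only [List.foldl_cons, List.foldl_nil]
    -- evaluate one step at index m
    have hset : ∀ v : Int, PySem.List.pySetD ((List.range L).map (fun j => if j < m then pvF j else 0)) (m : Int) v
        = ((List.range L).map (fun j => if j < m then pvF j else 0)).set m v := by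
      intro v; exact PySem.List.pySetD_natCast _ _ _
    have hget : ∀ (k : Nat), k < m →
        PySem.List.pyGetD ((List.range L).map (fun j => if j < m then pvF j else 0)) (k : Int) 0 = pvF k := by
      intro k hk
      rw [PySem.List.pyGetD_natCast]
      have hkL : k < L := lt_trans hk hmL
      rw [List.getD_eq_getElem?_getD]
      simp [hkL, hk]
    have hfinal : ∀ v : Int, v = pvF m →
        ((List.range L).map (fun j => if j < m then pvF j else 0)).set m v
          = (List.range L).map (fun j => if j < m + 1 then pvF j else 0) := by
      intro v hv
      apply List.ext_getElem
      · simp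
      · intro j h1 h2
        simp only [List.getElem_set, List.getElem_map, List.getElem_range]
        simp only [List.length_set, List.length_map, List.length_range] at h1
        split_ifs with ha hb <;> first
          | rfl
          | omega
          | exact hv.trans (congrArg pvF ha)
    unfold pvStepA
    by_cases hm2 : (m : Int) ≤ 2
    · rw [if_pos hm2, hset]
      exact hfinal _ (by rw [pvF_small m (by exact_mod_cast hm2)])
    · rw [if_neg hm2, hset]
      apply hfinal
      obtain ⟨k, rfl⟩ : ∃ k, m = k + 3 := ⟨m - 3, by omega⟩
      have h1 : ((k : Int) + 3 - 1) = ((k + 2 : Nat) : Int) := by push_cast; ring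
      have h2 : ((k : Int) + 3 - 2) = ((k + 1 : Nat) : Int) := by push_cast; ring
      push_cast
      rw [h1, h2, hget (k + 2) (by omega), hget (k + 1) (by omega)]
      show pvF (k + 2) + ((k : Int) + 2) * pvF (k + 1) = pvF (k + 3)
      rfl

lemma countPairingDP_eq_pvF (n : Int) (hn : 0 ≤ n) : countPairingDP n = pvF n.toNat := by
  unfold countPairingDP
  set L := (n + 1).toNat with hL
  have hcast : (n + 1 : Int) = (L : Int) := by omega
  have hinit : (PySem.List.pyRange 0 ((L : Nat) : Int) 1).map (fun _ => (0 : Int))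
      = (List.range L).map (fun _ => (0 : Int)) := by
    simp [List.map_const', PySem.List.length_pyRange_one]
  simp only [hcast]
  rw [hinit, foldA L L (le_refl L)]
  have hnn : n.toNat < L := by omega
  rw [PySem.List.pyGetD_eq_getElem _ _ hn (by simp; omega)]
  simp [hnn]

-- ======= B-side: the worklist loop computes pvF =======

-- every filled cell of dp holds its pvF value
def pvGood (dp : List (Option Int)) : Prop :=
  ∀ (m : Nat) (v : Int), dp[m]? = some (some v) → v = pvF m

-- number of unfilled cells
def pvNN (dp : List (Option Int)) : Nat := dp.countP (fun o => o.isNone)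

lemma pvNN_set (dp : List (Option Int)) (m : Nat) (v : Int)
    (hm : dp[m]? = some none) : pvNN (dp.set m (some v)) + 1 = pvNN dp := by
  induction dp generalizing m with
  | nil => simp at hm
  | cons a dp ih =>
    cases m with
    | zero =>
      simp at hm
      simp [pvNN, hm]
    | succ m =>
      simp at hm
      have := ih m hm
      simp only [List.set_cons_succ, pvNN, List.countP_cons] at *
      omega

lemma pvNN_pos (dp : List (Option Int)) (m : Nat) (hm : dp[m]? = some none) :
    1 ≤ pvNN dp := by
  have hmem : (none : Option Int) ∈ dp := by
    obtain ⟨hlt, he⟩ := List.getElem?_eq_some_iff.mp hm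
    exact he ▸ List.getElem_mem hlt
  have h0 : 0 < dp.countP (fun o => o.isNone) := List.countP_pos_iff.mpr ⟨none, hmem, rfl⟩
  unfold pvNN; omega

-- the four step shapes of the loop
lemma pvLoopB_succ (fuel : Nat) (dp : List (Option Int)) (j : Int) (rest : List Int) :
    pvLoopB (fuel + 1) dp (j :: rest) =
      match PySem.List.pyGetD dp j none with
      | some _ => pvLoopB fuel dp rest
      | none =>
        if j ≤ 2 then pvLoopB fuel (PySem.List.pySetD dp j (some j)) rest
        else
          match PySem.List.pyGetD dp (j - 1) none, PySem.List.pyGetD dp (j - 2) none with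
          | some a, some b => pvLoopB fuel (PySem.List.pySetD dp j (some (a + (j - 1) * b))) rest
          | _, _ => pvLoopB fuel dp ((j - 2) :: (j - 1) :: j :: rest) := rfl

lemma pvLoopB_nil (fuel : Nat) (dp : List (Option Int)) : pvLoopB fuel dp [] = dp := by
  cases fuel <;> rfl

lemma pvLoopB_hit (fuel : Nat) (dp : List (Option Int)) (j : Int) (rest : List Int) (v : Int)
    (h : PySem.List.pyGetD dp j none = some v) :
    pvLoopB (fuel + 1) dp (j :: rest) = pvLoopB fuel dp rest := by
  rw [pvLoopB_succ, h]

lemma pvLoopB_base (fuel : Nat) (dp : List (Option Int)) (j : Int) (rest : List Int)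
    (h : PySem.List.pyGetD dp j none = none) (hj : j ≤ 2) :
    pvLoopB (fuel + 1) dp (j :: rest) = pvLoopB fuel (PySem.List.pySetD dp j (some j)) rest := by
  rw [pvLoopB_succ, h, if_pos hj]

lemma pvLoopB_comb (fuel : Nat) (dp : List (Option Int)) (j : Int) (rest : List Int) (a b : Int)
    (h : PySem.List.pyGetD dp j none = none) (hj : ¬ j ≤ 2)
    (h1 : PySem.List.pyGetD dp (j - 1) none = some a)
    (h2 : PySem.List.pyGetD dp (j - 2) none = some b) :
    pvLoopB (fuel + 1) dp (j :: rest)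
      = pvLoopB fuel (PySem.List.pySetD dp j (some (a + (j - 1) * b))) rest := by
  rw [pvLoopB_succ, h, if_neg hj, h1, h2]

lemma pvLoopB_push1 (fuel : Nat) (dp : List (Option Int)) (j : Int) (rest : List Int)
    (h : PySem.List.pyGetD dp j none = none) (hj : ¬ j ≤ 2)
    (h1 : PySem.List.pyGetD dp (j - 1) none = none) :
    pvLoopB (fuel + 1) dp (j :: rest) = pvLoopB fuel dp ((j - 2) :: (j - 1) :: j :: rest) := by
  rw [pvLoopB_succ, h, if_neg hj, h1]

lemma pvLoopB_push2 (fuel : Nat) (dp : List (Option Int)) (j : Int) (rest : List Int) (a : Int)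
    (h : PySem.List.pyGetD dp j none = none) (hj : ¬ j ≤ 2)
    (h1 : PySem.List.pyGetD dp (j - 1) none = some a)
    (h2 : PySem.List.pyGetD dp (j - 2) none = none) :
    pvLoopB (fuel + 1) dp (j :: rest) = pvLoopB fuel dp ((j - 2) :: (j - 1) :: j :: rest) := by
  rw [pvLoopB_succ, h, if_neg hj, h1, h2]

-- MAIN INVARIANT: from a good table with index j on top, the loop resolves j in
-- k steps (k amortized by the cells it fills), leaving a good table that extends
-- the old one, holds pvF j at j, and is unchanged above j.
lemma pvLoopB_run (L : Nat) (j : Nat) : ∀ (dp : List (Option Int)) (rest : List Int),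
    dp.length = L → pvGood dp → j < L →
    ∃ (k : Nat) (dp' : List (Option Int)),
      (∀ fuel, pvLoopB (k + fuel) dp ((j : Int) :: rest) = pvLoopB fuel dp' rest) ∧
      dp'.length = L ∧ pvGood dp' ∧
      (∀ (m : Nat) (v : Int), dp[m]? = some (some v) → dp'[m]? = some (some v)) ∧
      dp'[j]? = some (some (pvF j)) ∧
      (∀ m : Nat, j < m → dp'[m]? = dp[m]?) ∧
      k + 3 * pvNN dp' ≤ 1 + 3 * pvNN dp := by
  induction j using Nat.strong_induction_on with
  | _ j ih =>
    intro dp rest hlen hgood hjL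
    have hget : PySem.List.pyGetD dp (j : Int) none = dp[j]?.getD none := by
      rw [PySem.List.pyGetD_natCast, List.getD_eq_getElem?_getD]
    have hjlen : j < dp.length := hlen ▸ hjL
    obtain ⟨o, ho⟩ : ∃ o, dp[j]? = some o := ⟨dp[j], List.getElem?_eq_some_iff.mpr ⟨hjlen, rfl⟩⟩
    cases o with
    | some v =>
      -- memo hit: one pop
      have hgo : PySem.List.pyGetD dp (j : Int) none = some v := by rw [hget, ho]; rfl
      refine ⟨1, dp, ?_, hlen, hgood, fun _ _ h => h, ?_, fun _ _ => rfl, by omega⟩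
      · intro fuel
        rw [show 1 + fuel = fuel + 1 from by omega, pvLoopB_hit fuel dp _ rest v hgo]
      · rw [ho, hgood j v ho]
    | none =>
      have hgo : PySem.List.pyGetD dp (j : Int) none = none := by rw [hget, ho]; rfl
      by_cases hj2 : (j : Int) ≤ 2
      · -- base case: fill with j, one pop
        have hj2' : j ≤ 2 := by exact_mod_cast hj2
        refine ⟨1, dp.set j (some j), ?_, by simp [hlen], ?_, ?_, ?_, ?_, ?_⟩
        · intro fuel
          rw [show 1 + fuel = fuel + 1 from by omega, pvLoopB_base fuel dp _ rest hgo hj2,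
            PySem.List.pySetD_natCast]
        · intro m v hm
          by_cases hmj : m = j
          · subst hmj
            rw [List.getElem?_set_self hjlen] at hm
            simp at hm
            rw [← hm, pvF_small m hj2']
          · rw [List.getElem?_set_ne (fun h => hmj h.symm)] at hm
            exact hgood m v hm
        · intro m v hm
          have hmj : m ≠ j := fun h => by rw [h, ho] at hm; cases hm
          rw [List.getElem?_set_ne (fun h => hmj h.symm)]; exact hm
        · rw [List.getElem?_set_self hjlen, pvF_small j hj2']
        · intro m hm
          exact List.getElem?_set_ne (by omega)
        · have := pvNN_set dp j (j : Int) ho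
          omega
      · -- j ≥ 3
        have hj3 : 3 ≤ j := by omega
        have h1lt : j - 1 < dp.length := by omega
        have h2lt : j - 2 < dp.length := by omega
        have hc1 : ((j : Int) - 1) = ((j - 1 : Nat) : Int) := by omega
        have hc2 : ((j : Int) - 2) = ((j - 2 : Nat) : Int) := by omega
        have hg1 : PySem.List.pyGetD dp ((j : Int) - 1) none = dp[j - 1]?.getD none := by
          rw [hc1, PySem.List.pyGetD_natCast, List.getD_eq_getElem?_getD]
        have hg2 : PySem.List.pyGetD dp ((j : Int) - 2) none = dp[j - 2]?.getD none := by
          rw [hc2, PySem.List.pyGetD_natCast, List.getD_eq_getElem?_getD]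
        obtain ⟨o1, ho1⟩ : ∃ o, dp[j - 1]? = some o := ⟨dp[j - 1], List.getElem?_eq_some_iff.mpr ⟨h1lt, rfl⟩⟩
        obtain ⟨o2, ho2⟩ : ∃ o, dp[j - 2]? = some o := ⟨dp[j - 2], List.getElem?_eq_some_iff.mpr ⟨h2lt, rfl⟩⟩
        -- the combining value is pvF j
        have hcomb : pvF (j - 1) + ((j : Int) - 1) * pvF (j - 2) = pvF j := by
          obtain ⟨t, rfl⟩ : ∃ t, j = t + 3 := ⟨j - 3, by omega⟩
          show pvF (t + 3 - 1) + ((t + 3 : Nat) - 1 : Int) * pvF (t + 3 - 2) = pvF (t + 3)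
          rw [show t + 3 - 1 = t + 2 from rfl, show t + 3 - 2 = t + 1 from rfl,
            show ((t + 3 : Nat) : Int) - 1 = (t : Int) + 2 from by push_cast; ring]
          rfl
        -- helper: the final combine step at j, once both deps are memoized in table e
        have hfill : ∀ (e : List (Option Int)), e.length = L → pvGood e →
            e[j]? = some none → e[j-1]? = some (some (pvF (j-1))) → e[j-2]? = some (some (pvF (j-2))) →
            ∃ (dp' : List (Option Int)),
              (∀ fuel, pvLoopB (1 + fuel) e ((j : Int) :: rest) = pvLoopB fuel dp' rest) ∧
              dp'.length = L ∧ pvGood dp' ∧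
              (∀ (m : Nat) (v : Int), e[m]? = some (some v) → dp'[m]? = some (some v)) ∧
              dp'[j]? = some (some (pvF j)) ∧
              (∀ m : Nat, j < m → dp'[m]? = e[m]?) ∧
              pvNN dp' + 1 = pvNN e := by
          intro e heL hegood hej he1 he2
          have hejlen : j < e.length := by
            by_contra h
            rw [List.getElem?_eq_none (by omega)] at hej; cases hej
          have hge : PySem.List.pyGetD e (j : Int) none = none := by
            rw [PySem.List.pyGetD_natCast, List.getD_eq_getElem?_getD, hej]; rfl
          have hge1 : PySem.List.pyGetD e ((j : Int) - 1) none = some (pvF (j - 1)) := by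
            rw [hc1, PySem.List.pyGetD_natCast, List.getD_eq_getElem?_getD, he1]; rfl
          have hge2 : PySem.List.pyGetD e ((j : Int) - 2) none = some (pvF (j - 2)) := by
            rw [hc2, PySem.List.pyGetD_natCast, List.getD_eq_getElem?_getD, he2]; rfl
          refine ⟨e.set j (some (pvF j)), ?_, by simp [heL], ?_, ?_, ?_, ?_, ?_⟩
          · intro fuel
            rw [show 1 + fuel = fuel + 1 from by omega,
              pvLoopB_comb fuel e _ rest _ _ hge hj2 hge1 hge2, hcomb,
              PySem.List.pySetD_natCast]
          · intro m v hm
            by_cases hmj : m = j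
            · subst hmj
              rw [List.getElem?_set_self hejlen] at hm
              simp at hm
              exact hm.symm
            · rw [List.getElem?_set_ne (fun h => hmj h.symm)] at hm
              exact hegood m v hm
          · intro m v hm
            have hmj : m ≠ j := fun h => by rw [h, hej] at hm; cases hm
            rw [List.getElem?_set_ne (fun h => hmj h.symm)]; exact hm
          · rw [List.getElem?_set_self hejlen]
          · intro m hm; exact List.getElem?_set_ne (by omega)
          · exact pvNN_set e j (pvF j) hej
        cases o1 with
        | some a =>
          cases o2 with
          | some b =>
            -- both deps known: one combine step
            have ha : a = pvF (j - 1) := hgood _ _ ho1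
            have hb : b = pvF (j - 2) := hgood _ _ ho2
            obtain ⟨dp', hrun, hL', hgood', hext', hatj', habove', hnn'⟩ :=
              hfill dp hlen hgood ho (ha ▸ ho1) (hb ▸ ho2)
            exact ⟨1, dp', hrun, hL', hgood', hext', hatj', habove',
              by have := pvNN_pos dp j ho; omega⟩
          | none =>
            -- one dep missing: push, resolve j-2 then j-1, then combine
            have hgo2 : PySem.List.pyGetD dp ((j : Int) - 2) none = none := by
              rw [hg2, ho2]; rfl
            have hgo1 : PySem.List.pyGetD dp ((j : Int) - 1) none = some a := by
              rw [hg1, ho1]; rfl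
            obtain ⟨k1, dp1, hrun1, hL1, hgood1, hext1, hat1, habove1, hnn1⟩ :=
              ih (j - 2) (by omega) dp ((j - 1 : Nat) :: (j : Nat) :: rest) hlen hgood (by omega)
            obtain ⟨k2, dp2, hrun2, hL2, hgood2, hext2, hat2, habove2, hnn2⟩ :=
              ih (j - 1) (by omega) dp1 ((j : Nat) :: rest) hL1 hgood1 (by omega)
            have hdp2j : dp2[j]? = some none := by
              rw [habove2 j (by omega), habove1 j (by omega), ho]
            obtain ⟨dp', hrun3, hL', hgood', hext', hatj', habove', hnn'⟩ :=
              hfill dp2 hL2 hgood2 hdp2j hat2 (hext2 _ _ hat1)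
            refine ⟨1 + k1 + k2 + 1, dp', ?_, hL', hgood', ?_, hatj', ?_, ?_⟩
            · intro fuel
              rw [show 1 + k1 + k2 + 1 + fuel = (k1 + (k2 + (1 + fuel))) + 1 from by omega,
                pvLoopB_push2 _ dp _ rest a hgo hj2 hgo1 hgo2,
                show ((j : Int) - 2) = ((j - 2 : Nat) : Int) from hc2,
                show ((j : Int) - 1) = ((j - 1 : Nat) : Int) from hc1,
                hrun1 (k2 + (1 + fuel)), hrun2 (1 + fuel), hrun3 fuel]
            · intro m v hm; exact hext' m v (hext2 m v (hext1 m v hm))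
            · intro m hm
              rw [habove' m (by omega), habove2 m (by omega), habove1 m (by omega)]
            · have hp2 : 1 ≤ pvNN dp2 := pvNN_pos dp2 j hdp2j
              omega
        | none =>
          -- dp[j-1] missing: push, resolve j-2 then j-1, then combine
          have hgo1 : PySem.List.pyGetD dp ((j : Int) - 1) none = none := by
            rw [hg1, ho1]; rfl
          obtain ⟨k1, dp1, hrun1, hL1, hgood1, hext1, hat1, habove1, hnn1⟩ :=
            ih (j - 2) (by omega) dp ((j - 1 : Nat) :: (j : Nat) :: rest) hlen hgood (by omega)
          obtain ⟨k2, dp2, hrun2, hL2, hgood2, hext2, hat2, habove2, hnn2⟩ :=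
            ih (j - 1) (by omega) dp1 ((j : Nat) :: rest) hL1 hgood1 (by omega)
          have hdp2j : dp2[j]? = some none := by
            rw [habove2 j (by omega), habove1 j (by omega), ho]
          obtain ⟨dp', hrun3, hL', hgood', hext', hatj', habove', hnn'⟩ :=
            hfill dp2 hL2 hgood2 hdp2j hat2 (hext2 _ _ hat1)
          refine ⟨1 + k1 + k2 + 1, dp', ?_, hL', hgood', ?_, hatj', ?_, ?_⟩
          · intro fuel
            rw [show 1 + k1 + k2 + 1 + fuel = (k1 + (k2 + (1 + fuel))) + 1 from by omega,
              pvLoopB_push1 _ dp _ rest hgo hj2 hgo1,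
              show ((j : Int) - 2) = ((j - 2 : Nat) : Int) from hc2,
              show ((j : Int) - 1) = ((j - 1 : Nat) : Int) from hc1,
              hrun1 (k2 + (1 + fuel)), hrun2 (1 + fuel), hrun3 fuel]
          · intro m v hm; exact hext' m v (hext2 m v (hext1 m v hm))
          · intro m hm
            rw [habove' m (by omega), habove2 m (by omega), habove1 m (by omega)]
          · have hp2 : 1 ≤ pvNN dp2 := pvNN_pos dp2 j hdp2j
            omega

lemma countPairingDP_alt_eq_pvF (n : Int) (hn : 0 ≤ n) : countPairingDP_alt n = pvF n.toNat := by
  obtain ⟨m, rfl⟩ : ∃ m : Nat, n = (m : Int) := ⟨n.toNat, by omega⟩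
  unfold countPairingDP_alt
  have hinit : (PySem.List.pyRange 0 ((m : Int) + 1) 1).map (fun _ => (none : Option Int))
      = List.replicate (m + 1) (none : Option Int) := by
    rw [show ((m : Int) + 1) = ((m + 1 : Nat) : Int) from by push_cast; ring]
    simp [List.map_const', PySem.List.length_pyRange_one]
  have hgood0 : pvGood (List.replicate (m + 1) (none : Option Int)) := by
    intro i v hi
    rcases Nat.lt_or_ge i (m + 1) with h | h
    · rw [List.getElem?_replicate, if_pos h] at hi; cases hi
    · rw [List.getElem?_eq_none (by simpa using h)] at hi; cases hi
  obtain ⟨k, dp', hrun, hL', _, _, hatj, _, hk⟩ :=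
    pvLoopB_run (m + 1) m (List.replicate (m + 1) (none : Option Int)) []
      (by simp) hgood0 (by omega)
  have hNN0 : pvNN (List.replicate (m + 1) (none : Option Int)) = m + 1 := by
    unfold pvNN
    induction (m + 1) with
    | zero => rfl
    | succ t iht => rw [List.replicate_succ, List.countP_cons]; simp [iht]
  rw [hNN0] at hk
  have hfuel : (3 * ((m : Int) + 1) + 2).toNat = k + ((3 * ((m : Int) + 1) + 2).toNat - k) := by
    omega
  rw [hinit, hfuel]
  show (PySem.List.pyGetD
      (pvLoopB (k + ((3 * ((m : Int) + 1) + 2).toNat - k)) (List.replicate (m + 1) none) [(m : Int)])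
      ((m : Int)) none).getD 0 = pvF ((m : Int)).toNat
  rw [hrun ((3 * ((m : Int) + 1) + 2).toNat - k), pvLoopB_nil,
    PySem.List.pyGetD_natCast, List.getD_eq_getElem?_getD, hatj]
  simp

-- ===== VERDICT (by name: the statement is the Claim_ definition above) =====
theorem countPairingDP_spec : Claim_equal_countPairingDP := by
  intro n _ hpre
  unfold Spec_countPairingDP
  rw [countPairingDP_eq_pvF n hpre, countPairingDP_alt_eq_pvF n hpre]
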